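-- pv_equiv track=rewrite | github.com/dodontommy/vortex-clash | tools/repack_sheet.py | find_label_bars
-- ===== SOURCE A (Python) =====
-- def find_label_bars(row_content, min_height=14, threshold=1500):
--     """Find full-width label bars that separate animations."""
--     bars = []
--     in_label = False
--     count = 0
--     start = 0
--     for y in range(len(row_content)):
--         if row_content[y] > threshold:
--             if not in_label:
--                 start = y
--                 in_label = True
--                 count = 1
--             else:
--                 count += 1
--         else:
--             if in_label and count >= min_height:
--                 bars.append((start, start + count))
--             in_label = False
--             count = 0
--     if in_label and count >= min_height:
--         bars.append((start, start + count))
--     return bars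
-- ===== SOURCE B (Python) =====
-- def find_label_bars(row_content, min_height=14, threshold=1500):
--     """Find label bars by boundary detection: compute the boolean mask, locate
--     run-start indices (high with no high to the left) and run-end indices (high
--     with no high to the right), zip them into intervals and filter by length."""
--     mask = [v > threshold for v in row_content]
--     n = len(mask)
--     starts = [i for i in range(n) if mask[i] and (i == 0 or not mask[i - 1])]
--     ends = [i + 1 for i in range(n) if mask[i] and (i == n - 1 or not mask[i + 1])]
--     return [(s, e) for s, e in zip(starts, ends) if e - s >= min_height]
-- ===== Notes on version B (the rewrite author's own statement) =====
-- stated objective: alternative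
-- what changed: Replaced A's single-pass in_label/count/start state machine (with its duplicated after-loop flush) by boundary detection: build the boolean mask, collect run-start indices (high with no high left neighbour) and run-end indices (high with no high right neighbour) in two index filters, zip them into intervals and filter by length.
import Mathlib
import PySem

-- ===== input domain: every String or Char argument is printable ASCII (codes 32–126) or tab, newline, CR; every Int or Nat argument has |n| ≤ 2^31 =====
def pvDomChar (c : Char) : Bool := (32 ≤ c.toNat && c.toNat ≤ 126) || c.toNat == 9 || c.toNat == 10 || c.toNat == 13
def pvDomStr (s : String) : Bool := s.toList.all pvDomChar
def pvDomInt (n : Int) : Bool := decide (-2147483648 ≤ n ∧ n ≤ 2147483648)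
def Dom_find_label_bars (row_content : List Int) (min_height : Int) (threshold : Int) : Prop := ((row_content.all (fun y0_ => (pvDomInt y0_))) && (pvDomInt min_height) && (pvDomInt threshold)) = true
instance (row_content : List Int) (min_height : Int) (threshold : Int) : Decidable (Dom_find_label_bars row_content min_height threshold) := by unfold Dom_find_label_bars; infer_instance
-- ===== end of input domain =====

-- B replaces A's single-pass in_label/count/start state machine by boundary
-- detection: a boolean mask, two index filters picking run starts and run ends,
-- a zip pairing them into intervals, and a length filter (objective: alternative).

-- ===== PORT A =====
-- A's for-loop over `range(len(row_content))` reading `row_content[y]` visits the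
-- elements in order; the loop body is transcribed over the exact Python state
-- (bars, in_label, count, start), with y carried as the running index.
def flbLoopA (min_height threshold : Int) :
    List Int → Int → (List (Int × Int) × Bool × Int × Int) → (List (Int × Int) × Bool × Int × Int)
  | [], _, st => st
  | v :: rest, y, (bars, in_label, count, start) =>
    if v > threshold then
      if !in_label then
        flbLoopA min_height threshold rest (y + 1) (bars, true, 1, y)
      else
        flbLoopA min_height threshold rest (y + 1) (bars, in_label, count + 1, start)
    else
      if in_label && decide (count ≥ min_height) then
        flbLoopA min_height threshold rest (y + 1) (bars ++ [(start, start + count)], false, 0, start)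
      else
        flbLoopA min_height threshold rest (y + 1) (bars, false, 0, start)

def find_label_bars (row_content : List Int) (min_height : Int) (threshold : Int) : List (Int × Int) :=
  let st := flbLoopA min_height threshold row_content 0 ([], false, 0, 0)
  match st with
  | (bars, in_label, count, start) =>
    if in_label && decide (count ≥ min_height) then bars ++ [(start, start + count)] else bars

-- ===== PORT B =====
-- Source B: mask = [v > threshold for v in row_content]; starts/ends are index filters
-- over range(n); zip + length filter. Python's list indices are Nat-valued here and
-- cast to Int in the returned pairs (exact: they are non-negative Python ints).
-- Python short-circuits `i == 0 or not mask[i-1]`; in Lean `i - 1` at i = 0 is Nat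
-- truncation, harmless because the `i == 0` disjunct already decides the condition.
def find_label_bars_alt (row_content : List Int) (min_height : Int) (threshold : Int) : List (Int × Int) :=
  let mask : List Bool := row_content.map (fun v => decide (v > threshold))
  let n := mask.length
  let starts := (List.range n).filter (fun i => mask.getD i false && (i == 0 || !(mask.getD (i - 1) false)))
  let ends := ((List.range n).filter (fun i => mask.getD i false && (i == n - 1 || !(mask.getD (i + 1) false)))).map (fun i => (i + 1 : Nat))
  ((starts.zip ends).filter (fun p => decide ((p.2 : Int) - (p.1 : Int) ≥ min_height))).map
    (fun p => ((p.1 : Int), (p.2 : Int)))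

-- ===== PRECONDITION & SPEC =====
def Spec_find_label_bars (row_content : List Int) (min_height : Int) (threshold : Int) (out : List (Int × Int)) : Prop := out = find_label_bars_alt row_content min_height threshold
instance (row_content : List Int) (min_height : Int) (threshold : Int) (out : List (Int × Int)) : Decidable (Spec_find_label_bars row_content min_height threshold out) := by unfold Spec_find_label_bars; infer_instance

-- ===== CLAIM (what is proved, stated in full; the proofs are below) =====
def Claim_equal_find_label_bars : Prop := ∀ (row_content : List Int) (min_height : Int) (threshold : Int), Dom_find_label_bars row_content min_height threshold → Spec_find_label_bars row_content min_height threshold (find_label_bars row_content min_height threshold)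

-- ===== LEMMAS AND PROOFS =====

-- the after-loop flush of A
def flbFinish (min_height : Int) : (List (Int × Int) × Bool × Int × Int) → List (Int × Int)
  | (bars, in_label, count, start) =>
    if in_label && decide (count ≥ min_height) then bars ++ [(start, start + count)] else bars

-- run-by-run intermediate form (proof device bridging the two ports)
def flbGo (min_height threshold : Int) (offset : Int) : List Int → List (Int × Int)
  | [] => []
  | v :: rest =>
    let k : Bool := decide (v > threshold)
    let run := rest.takeWhile (fun x => decide (x > threshold) == k)
    let len : Int := 1 + run.length
    let rest' := rest.dropWhile (fun x => decide (x > threshold) == k)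
    (if k && decide (len ≥ min_height) then [(offset, offset + len)] else [])
      ++ flbGo min_height threshold (offset + len) rest'
termination_by l => l.length
decreasing_by
  simpa using Nat.lt_succ_of_le (List.length_dropWhile_le _ _)

-- recursive characterisations of B's start/end index filters
def sIdx (t : Int) (prev : Bool) : List Int → List Nat
  | [] => []
  | v :: rest => (if decide (v > t) && !prev then [0] else []) ++ (sIdx t (decide (v > t)) rest).map (· + 1)

def eIdx (t : Int) : List Int → List Nat
  | [] => []
  | v :: rest =>
    (if decide (v > t) && !((rest.map (fun x => decide (x > t))).getD 0 false) then [0] else [])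
      ++ (eIdx t rest).map (· + 1)

theorem dropWhile_head_false {α : Type} (p : α → Bool) :
    ∀ (l : List α) (w : α) (tl : List α), l.dropWhile p = w :: tl → p w = false := by
  intro l
  induction l with
  | nil => intro w tl h; simp [List.dropWhile] at h
  | cons v vs ih =>
    intro w tl h
    by_cases hp : p v
    · rw [List.dropWhile_cons_of_pos hp] at h; exact ih w tl h
    · rw [List.dropWhile_cons_of_neg hp] at h
      cases h; simpa using hp

theorem flbLoopA_falseStep (mh t : Int) (v : Int) (rest : List Int) (y s : Int)
    (bars : List (Int × Int)) (hv : ¬ v > t) :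
    flbLoopA mh t (v :: rest) y (bars, false, 0, s)
      = flbLoopA mh t rest (y + 1) (bars, false, 0, s) := by
  simp [flbLoopA, hv]

theorem flbLoopA_trueRun (mh t : Int) (run : List Int) :
    ∀ (rest : List Int) (y c s : Int) (bars : List (Int × Int)), (∀ x ∈ run, x > t) →
    flbLoopA mh t (run ++ rest) y (bars, true, c, s)
      = flbLoopA mh t rest (y + run.length) (bars, true, c + run.length, s) := by
  induction run with
  | nil => intro rest y c s bars _; simp
  | cons v vs ih =>
    intro rest y c s bars h
    have hv : v > t := h v (by simp)
    have hstep : flbLoopA mh t ((v :: vs) ++ rest) y (bars, true, c, s)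
        = flbLoopA mh t (vs ++ rest) (y + 1) (bars, true, c + 1, s) := by
      simp [flbLoopA, hv]
    rw [hstep, ih rest (y + 1) (c + 1) s bars (fun x hx => h x (by simp [hx]))]
    congr 1 <;> (simp [List.length_cons]; ring_nf)

theorem flbGo_cons_false (mh t off v : Int) (rest : List Int) (hv : ¬ v > t) :
    flbGo mh t off (v :: rest) = flbGo mh t (off + 1) rest := by
  match rest with
  | [] => simp [flbGo, hv]
  | w :: tl =>
    by_cases hw : w > t
    · rw [flbGo]
      simp [hv, hw]
    · rw [flbGo, flbGo]
      simp [hv, hw]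
      congr 1
      ring

theorem flbMain (mh t : Int) :
    ∀ (n : Nat) (l : List Int), l.length ≤ n → ∀ (y s : Int) (bars : List (Int × Int)),
    flbFinish mh (flbLoopA mh t l y (bars, false, 0, s)) = bars ++ flbGo mh t y l := by
  intro n
  induction n with
  | zero =>
    intro l hl y s bars
    have hnil : l = [] := List.length_eq_zero_iff.mp (Nat.le_antisymm hl (Nat.zero_le _))
    subst hnil
    simp [flbLoopA, flbFinish, flbGo]
  | succ n ih =>
    intro l hl y s bars
    match l with
    | [] => simp [flbLoopA, flbFinish, flbGo]
    | v :: rest =>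
      have hrest : rest.length ≤ n := by
        have : rest.length + 1 ≤ n + 1 := by simpa using hl
        omega
      by_cases hv : v > t
      · -- high head: A enters label state and we traverse the whole maximal run
        have hkey2 : (fun x : Int => decide (x > t) == true) = (fun x : Int => decide (x > t)) := by
          funext x; simp
        have hsplit : rest.takeWhile (fun x => decide (x > t)) ++ rest.dropWhile (fun x => decide (x > t)) = rest :=
          List.takeWhile_append_dropWhile
        have hruntrue : ∀ x ∈ rest.takeWhile (fun x => decide (x > t)), x > t := by
          intro x hx; simpa using List.mem_takeWhile_imp hx
        have hstep : flbLoopA mh t (v :: rest) y (bars, false, 0, s)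
            = flbLoopA mh t (rest.dropWhile (fun x => decide (x > t)))
                (y + 1 + (rest.takeWhile (fun x => decide (x > t))).length)
                (bars, true, 1 + ((rest.takeWhile (fun x => decide (x > t))).length : Int), y) := by
          conv_lhs => rw [← hsplit]
          simp only [flbLoopA, if_pos hv, Bool.not_false]
          rw [if_pos trivial, flbLoopA_trueRun mh t _ _ (y + 1) 1 y bars hruntrue]
        have hgo : flbGo mh t y (v :: rest)
            = (if decide ((1 + ((rest.takeWhile (fun x => decide (x > t))).length : Int)) ≥ mh) then
                 [(y, y + (1 + ((rest.takeWhile (fun x => decide (x > t))).length : Int)))] else [])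
              ++ flbGo mh t (y + (1 + ((rest.takeWhile (fun x => decide (x > t))).length : Int)))
                   (rest.dropWhile (fun x => decide (x > t))) := by
          rw [flbGo]
          simp only [decide_eq_true hv, hkey2, Bool.true_and]
        cases hre : rest.dropWhile (fun x => decide (x > t)) with
        | nil =>
          rw [hre] at hstep hgo
          rw [hstep, hgo]
          by_cases hlen : (1 + ((rest.takeWhile (fun x => decide (x > t))).length : Int)) ≥ mh
          · simp [flbLoopA, flbFinish, flbGo, hlen]
          · simp [flbLoopA, flbFinish, flbGo, hlen]
        | cons w tl =>
          rw [hre] at hstep hgo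
          have hw : ¬ w > t := by
            have := dropWhile_head_false (fun x : Int => decide (x > t)) rest w tl hre
            simpa using this
          have hle : (w :: tl).length ≤ n := by
            have h1 : (rest.dropWhile (fun x => decide (x > t))).length ≤ rest.length :=
              List.length_dropWhile_le _ _
            rw [hre] at h1
            omega
          have hstep2 : flbLoopA mh t (w :: tl)
                (y + 1 + (rest.takeWhile (fun x => decide (x > t))).length)
                (bars, true, 1 + ((rest.takeWhile (fun x => decide (x > t))).length : Int), y)
              = flbLoopA mh t tl (y + 1 + (rest.takeWhile (fun x => decide (x > t))).length + 1)
                  (bars ++ (if decide ((1 + ((rest.takeWhile (fun x => decide (x > t))).length : Int)) ≥ mh) then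
                     [(y, y + (1 + ((rest.takeWhile (fun x => decide (x > t))).length : Int)))] else []),
                   false, 0, y) := by
            by_cases hlen : (1 + ((rest.takeWhile (fun x => decide (x > t))).length : Int)) ≥ mh
            · simp [flbLoopA, hw, hlen]
            · simp [flbLoopA, hw, hlen]
          have hstep3 : flbLoopA mh t (w :: tl)
                (y + 1 + (rest.takeWhile (fun x => decide (x > t))).length)
                (bars ++ (if decide ((1 + ((rest.takeWhile (fun x => decide (x > t))).length : Int)) ≥ mh) then
                   [(y, y + (1 + ((rest.takeWhile (fun x => decide (x > t))).length : Int)))] else []),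
                 false, 0, y)
              = flbLoopA mh t tl (y + 1 + (rest.takeWhile (fun x => decide (x > t))).length + 1)
                  (bars ++ (if decide ((1 + ((rest.takeWhile (fun x => decide (x > t))).length : Int)) ≥ mh) then
                     [(y, y + (1 + ((rest.takeWhile (fun x => decide (x > t))).length : Int)))] else []),
                   false, 0, y) :=
            flbLoopA_falseStep mh t w tl _ _ _ hw
          have hoff : y + 1 + ((rest.takeWhile (fun x => decide (x > t))).length : Int)
              = y + (1 + ((rest.takeWhile (fun x => decide (x > t))).length : Int)) := by ring
          rw [hstep, hstep2, ← hstep3, ih (w :: tl) hle, hoff, hgo, List.append_assoc]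
      · -- low head: A stays out of label state; B also skips the low element
        rw [flbLoopA_falseStep mh t v rest y s bars hv, ih rest hrest,
          flbGo_cons_false mh t y v rest hv]

-- B's start-index filter computes sIdx
theorem startsEq (t : Int) :
    ∀ (l : List Int) (prev : Bool),
    (List.range l.length).filter
        (fun i => (l.map (fun v => decide (v > t))).getD i false
          && ((i == 0 && !prev) || !((l.map (fun v => decide (v > t))).getD (i - 1) false)))
      = sIdx t prev l := by
  intro l
  induction l with
  | nil => intro prev; simp [sIdx]
  | cons v rest ih =>
    intro prev
    rw [List.length_cons, List.range_succ_eq_map, List.filter_cons, List.filter_map]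
    have hshift : ((fun i => ((v :: rest).map (fun v => decide (v > t))).getD i false
          && ((i == 0 && !prev) || !(((v :: rest).map (fun v => decide (v > t))).getD (i - 1) false))) ∘ Nat.succ)
        = (fun i => (rest.map (fun v => decide (v > t))).getD i false
          && ((i == 0 && !(decide (v > t))) || !((rest.map (fun v => decide (v > t))).getD (i - 1) false))) := by
      funext i
      match i with
      | 0 =>
        simp only [Function.comp, List.map_cons, List.getD_cons_succ]
        cases hm : (rest.map (fun v => decide (v > t))).getD 0 false <;>
          cases hd : decide (v > t) <;> simp
      | Nat.succ j =>
        simp only [Function.comp, List.map_cons, List.getD_cons_succ]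
        have h1 : j + 1 - 1 = j := by omega
        have h2 : j + 1 + 1 - 1 = j + 1 := by omega
        simp [h1, h2]
    rw [hshift, ih (decide (v > t))]
    have hp0 : (((v :: rest).map (fun v => decide (v > t))).getD 0 false
          && ((0 == 0 && !prev) || !(((v :: rest).map (fun v => decide (v > t))).getD (0 - 1) false)))
        = (decide (v > t) && !prev) := by
      simp only [List.map_cons, List.getD_cons_zero, Nat.zero_sub]
      cases hd : decide (v > t) <;> cases prev <;> simp
    rw [hp0]
    cases hd : decide (v > t) <;> cases prev <;>
      simp [sIdx, hd]

-- B's end-index filter computes eIdx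
theorem endsEq (t : Int) :
    ∀ (l : List Int),
    (List.range l.length).filter
        (fun i => (l.map (fun v => decide (v > t))).getD i false
          && !((l.map (fun v => decide (v > t))).getD (i + 1) false))
      = eIdx t l := by
  intro l
  induction l with
  | nil => simp [eIdx]
  | cons v rest ih =>
    rw [List.length_cons, List.range_succ_eq_map, List.filter_cons, List.filter_map]
    have hshift : ((fun i => ((v :: rest).map (fun v => decide (v > t))).getD i false
          && !(((v :: rest).map (fun v => decide (v > t))).getD (i + 1) false)) ∘ Nat.succ)
        = (fun i => (rest.map (fun v => decide (v > t))).getD i false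
          && !((rest.map (fun v => decide (v > t))).getD (i + 1) false)) := by
      funext i
      simp [Function.comp]
    rw [hshift, ih]
    simp only [List.map_cons, List.getD_cons_zero, List.getD_cons_succ, eIdx]
    split_ifs <;> simp

theorem sIdx_all_high (t : Int) :
    ∀ (run : List Int), (∀ x ∈ run, decide (x > t) = true) → ∀ (rest' : List Int),
    sIdx t true (run ++ rest') = (sIdx t true rest').map (fun i => i + run.length) := by
  intro run
  induction run with
  | nil => intro _ rest'; simp
  | cons h tl ih =>
    intro hall rest'
    have hh : decide (h > t) = true := hall h (by simp)
    rw [List.cons_append, sIdx, hh, ih (fun x hx => hall x (by simp [hx])) rest']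
    simp only [Bool.not_true, Bool.and_false, if_neg (by simp : ¬ (false = true)), List.nil_append,
      List.map_map]
    exact List.map_congr_left (fun i _ => by simp [Function.comp]; omega)

theorem sIdx_prev_irrel (t : Int) (l : List Int)
    (h : ∀ w tl, l = w :: tl → decide (w > t) = false) (p q : Bool) :
    sIdx t p l = sIdx t q l := by
  cases l with
  | nil => rfl
  | cons w tl => simp [sIdx, h w tl rfl]

theorem eIdx_high_run (t : Int) :
    ∀ (run : List Int), (∀ x ∈ run, decide (x > t) = true) →
    ∀ (v : Int) (rest' : List Int), decide (v > t) = true →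
    (∀ w tl, rest' = w :: tl → decide (w > t) = false) →
    eIdx t (v :: (run ++ rest')) = run.length :: (eIdx t rest').map (fun i => i + (run.length + 1)) := by
  intro run
  induction run with
  | nil =>
    intro _ v rest' hv hlow
    cases rest' with
    | nil => simp [eIdx, hv]
    | cons w tl => simp [eIdx, hv, hlow w tl rfl]
  | cons w ws ih =>
    intro hall v rest' hv hlow
    have hw : decide (w > t) = true := hall w (by simp)
    rw [List.cons_append, eIdx]
    simp only [List.map_cons, List.getD_cons_zero, hw, Bool.not_true,
      Bool.and_false, if_neg (by simp : ¬ (false = true)), List.nil_append]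
    rw [show w :: (ws ++ rest') = w :: (ws ++ rest') from rfl,
      ih (fun x hx => hall x (by simp [hx])) w rest' hw hlow]
    simp only [List.map_cons, List.map_map, List.length_cons]
    congr 1

theorem goZip (mh t : Int) :
    ∀ (n : Nat) (l : List Int), l.length ≤ n → ∀ (off : Int),
    flbGo mh t off l
      = (((sIdx t false l).zip ((eIdx t l).map (fun i => (i + 1 : Nat)))).filter
            (fun p => decide ((p.2 : Int) - (p.1 : Int) ≥ mh))).map
          (fun p => (off + (p.1 : Int), off + (p.2 : Int))) := by
  intro n
  induction n with
  | zero =>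
    intro l hl off
    have hnil : l = [] := List.length_eq_zero_iff.mp (Nat.le_antisymm hl (Nat.zero_le _))
    subst hnil
    simp [flbGo, sIdx, eIdx]
  | succ n ih =>
    intro l hl off
    match l with
    | [] => simp [flbGo, sIdx, eIdx]
    | v :: rest =>
      by_cases hv : v > t
      · -- high head
        have hd : decide (v > t) = true := by simp [hv]
        have hkey2 : (fun x : Int => decide (x > t) == true) = (fun x : Int => decide (x > t)) := by
          funext x; simp
        have hsplit : rest.takeWhile (fun x => decide (x > t)) ++ rest.dropWhile (fun x => decide (x > t)) = rest :=
          List.takeWhile_append_dropWhile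
        have hrun : ∀ x ∈ rest.takeWhile (fun x => decide (x > t)), decide (x > t) = true := by
          intro x hx; simpa using List.mem_takeWhile_imp hx
        have hlow' : ∀ w tl, rest.dropWhile (fun x => decide (x > t)) = w :: tl → decide (w > t) = false := by
          intro w tl h
          have := dropWhile_head_false (fun x : Int => decide (x > t)) rest w tl h
          simpa using this
        have hlen : (rest.dropWhile (fun x => decide (x > t))).length ≤ n := by
          have h1 : (rest.dropWhile (fun x => decide (x > t))).length ≤ rest.length :=
            List.length_dropWhile_le _ _
          have h2 : rest.length + 1 ≤ n + 1 := by simpa using hl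
          omega
        have hgo : flbGo mh t off (v :: rest)
            = (if decide ((1 + ((rest.takeWhile (fun x => decide (x > t))).length : Int)) ≥ mh) then
                 [(off, off + (1 + ((rest.takeWhile (fun x => decide (x > t))).length : Int)))] else [])
              ++ flbGo mh t (off + (1 + ((rest.takeWhile (fun x => decide (x > t))).length : Int)))
                   (rest.dropWhile (fun x => decide (x > t))) := by
          rw [flbGo]
          simp only [decide_eq_true hv, hkey2, Bool.true_and]
        have hS : sIdx t false (v :: rest)
            = 0 :: (sIdx t false (rest.dropWhile (fun x => decide (x > t)))).map
                (fun i => i + ((rest.takeWhile (fun x => decide (x > t))).length + 1)) := by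
          rw [sIdx, hd]
          conv_lhs => rw [← hsplit]
          rw [sIdx_all_high t _ hrun, sIdx_prev_irrel t _ hlow' true false, List.map_map]
          simp
        have hE : eIdx t (v :: rest)
            = (rest.takeWhile (fun x => decide (x > t))).length
                :: (eIdx t (rest.dropWhile (fun x => decide (x > t)))).map
                    (fun i => i + ((rest.takeWhile (fun x => decide (x > t))).length + 1)) := by
          conv_lhs => rw [← hsplit]
          exact eIdx_high_run t _ hrun v _ hd hlow'
        rw [hgo, hS, hE]
        -- abbreviations
        generalize hL : (rest.takeWhile (fun x => decide (x > t))).length = L at *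
        generalize hR : rest.dropWhile (fun x => decide (x > t)) = R at *
        rw [List.map_cons, List.zip_cons_cons, List.filter_cons]
        have hBswap : ((eIdx t R).map (fun i => i + (L + 1))).map (fun i => (i + 1 : Nat))
            = ((eIdx t R).map (fun i => (i + 1 : Nat))).map (fun i => i + (L + 1)) := by
          simp only [List.map_map]
          exact List.map_congr_left (fun i _ => by simp [Function.comp]; omega)
        have hp : ((fun p : Nat × Nat => decide ((p.2 : Int) - (p.1 : Int) ≥ mh))
              ∘ Prod.map (fun i => i + (L + 1)) (fun i => i + (L + 1)))
            = (fun p : Nat × Nat => decide ((p.2 : Int) - (p.1 : Int) ≥ mh)) := by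
          funext p
          simp only [Function.comp, Prod.map]
          rw [decide_eq_decide]
          push_cast
          omega
        have hg : ((fun p : Nat × Nat => (off + (p.1 : Int), off + (p.2 : Int)))
              ∘ Prod.map (fun i => i + (L + 1)) (fun i => i + (L + 1)))
            = (fun p : Nat × Nat => (off + (1 + (L : Int)) + (p.1 : Int), off + (1 + (L : Int)) + (p.2 : Int))) := by
          funext p
          simp only [Function.comp, Prod.map, Prod.ext_iff]
          push_cast
          constructor <;> ring
        rw [hBswap, List.zip_map, List.filter_map, hp]
        by_cases hc : (1 + (L : Int)) ≥ mh
        · rw [if_pos (by simp only [decide_eq_true_eq, ge_iff_le]; omega), if_pos (by simp only [decide_eq_true_eq, ge_iff_le]; push_cast; omega)]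
          simp only [List.map_cons, List.map_map]
          rw [hg, ← ih R hlen (off + (1 + (L : Int)))]
          simp only [List.singleton_append]
          congr 1
          simp [Prod.ext_iff]
          ring
        · rw [if_neg (by simp only [decide_eq_true_eq, ge_iff_le, not_le]; omega), if_neg (by simp only [decide_eq_true_eq, ge_iff_le, not_le]; push_cast; omega)]
          simp only [List.map_map]
          rw [hg, ← ih R hlen (off + (1 + (L : Int)))]
          simp
      · -- low head
        have hd : decide (v > t) = false := by simp [hv]
        have hrest : rest.length ≤ n := by
          have : rest.length + 1 ≤ n + 1 := by simpa using hl
          omega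
        have hS : sIdx t false (v :: rest) = (sIdx t false rest).map (fun i => i + 1) := by
          simp [sIdx, hd]
        have hE : eIdx t (v :: rest) = (eIdx t rest).map (fun i => i + 1) := by
          simp [eIdx, hd]
        rw [flbGo_cons_false mh t off v rest hv, ih rest hrest (off + 1), hS, hE,
          List.zip_map, List.filter_map, List.map_map]
        have hp : ((fun p : Nat × Nat => decide ((p.2 : Int) - (p.1 : Int) ≥ mh))
              ∘ Prod.map (fun i => i + 1) (fun i => i + 1))
            = (fun p : Nat × Nat => decide ((p.2 : Int) - (p.1 : Int) ≥ mh)) := by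
          funext p
          simp only [Function.comp, Prod.map]
          rw [decide_eq_decide]
          push_cast
          omega
        have hg : ((fun p : Nat × Nat => (off + (p.1 : Int), off + (p.2 : Int)))
              ∘ Prod.map (fun i => i + 1) (fun i => i + 1))
            = (fun p : Nat × Nat => (off + 1 + (p.1 : Int), off + 1 + (p.2 : Int))) := by
          funext p
          simp only [Function.comp, Prod.map, Prod.ext_iff]
          push_cast
          constructor <;> ring
        rw [hp, hg]

-- ===== VERDICT (by name: the statement is the Claim_ definition above) =====
theorem find_label_bars_spec : Claim_equal_find_label_bars := by
  intro rc mh t _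
  unfold Spec_find_label_bars find_label_bars find_label_bars_alt
  have hA : flbFinish mh (flbLoopA mh t rc 0 ([], false, 0, 0)) = flbGo mh t 0 rc := by
    simpa using flbMain mh t rc.length rc (le_refl _) 0 0 []
  have hstarts : (List.range rc.length).filter
      (fun i => (rc.map (fun v => decide (v > t))).getD i false
        && (i == 0 || !((rc.map (fun v => decide (v > t))).getD (i - 1) false)))
      = sIdx t false rc := by
    rw [← startsEq t rc false]
    apply List.filter_congr
    intro i _
    simp
  have hends : (List.range rc.length).filter
      (fun i => (rc.map (fun v => decide (v > t))).getD i false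
        && (i == rc.length - 1 || !((rc.map (fun v => decide (v > t))).getD (i + 1) false)))
      = eIdx t rc := by
    rw [← endsEq t rc]
    apply List.filter_congr
    intro i hi
    simp only [List.mem_range] at hi
    by_cases h : i = rc.length - 1
    · subst h
      have h1 : (rc.map (fun v => decide (v > t))).getD (rc.length - 1 + 1) false = false := by
        apply List.getD_eq_default
        simp only [List.length_map]
        omega
      simp only [List.getD, List.getElem?_map] at h1
      simp [h1]
    · have h2 : (i == rc.length - 1) = false := by simpa using h
      simp [h2]
  have hZ : flbGo mh t 0 rc
      = (((sIdx t false rc).zip ((eIdx t rc).map (fun i => (i + 1 : Nat)))).filter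
            (fun p => decide ((p.2 : Int) - (p.1 : Int) ≥ mh))).map
          (fun p => ((p.1 : Int), (p.2 : Int))) := by
    rw [goZip mh t rc.length rc (le_refl _) 0]
    simp
  show flbFinish mh (flbLoopA mh t rc 0 ([], false, 0, 0)) = _
  rw [hA, hZ]
  simp only [List.length_map]
  rw [hstarts, hends]
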